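-- pv_equiv track=rewrite | github.com/BOBO1997/osp_solutions | solutions/e2d2_qrem_20220412/zne_utils.py | make_stf_basis
-- ===== SOURCE A (Python) =====
-- def make_stf_basis(n, basis_elements = ["X","Y","Z"]):
--     if n == 1:
--         return basis_elements
--     basis = []
--     for i in basis_elements:
--         sub_basis = make_stf_basis(n - 1, basis_elements)
--         basis += [i + j for j in sub_basis]
--     return basis
-- ===== SOURCE B (Python) =====
-- def make_stf_basis(n, basis_elements = ["X","Y","Z"]):
--     result = basis_elements
--     for _ in range(n - 1):
--         result = [i + j for i in basis_elements for j in result]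
--     return result
-- ===== Notes on version B (the rewrite author's own statement) =====
-- stated objective: alternative
-- what changed: Replaces A's recursion (which re-calls itself once per basis element per level, recomputing the same sub-basis each time) by a single iterative product loop that extends one accumulated list n-1 times.
import Mathlib
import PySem

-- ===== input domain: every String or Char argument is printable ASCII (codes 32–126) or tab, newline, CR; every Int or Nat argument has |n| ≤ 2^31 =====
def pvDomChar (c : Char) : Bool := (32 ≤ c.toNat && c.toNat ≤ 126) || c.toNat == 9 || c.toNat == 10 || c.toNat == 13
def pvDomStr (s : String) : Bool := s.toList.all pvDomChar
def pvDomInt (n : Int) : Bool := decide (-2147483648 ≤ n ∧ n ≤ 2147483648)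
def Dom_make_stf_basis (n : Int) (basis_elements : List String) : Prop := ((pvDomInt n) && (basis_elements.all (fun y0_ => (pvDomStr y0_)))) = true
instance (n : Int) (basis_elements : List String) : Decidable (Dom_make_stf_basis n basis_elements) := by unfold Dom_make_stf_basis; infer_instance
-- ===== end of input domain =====

-- B replaces A's recursion (which recomputes the same sub-basis once per element per level)
-- by one iterative loop extending an accumulated list n-1 times; return values agree for n ≥ 1.

-- ===== PORT A =====
-- A recurses on n; for n ≤ 0 the Python recurses forever (RecursionError), excluded by Pre_.
-- The recursion is transcribed on the Nat depth n.toNat (stfA 0 is never reached under Pre_).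
def stfA : Nat → List String → List String
  | 0, _ => []
  | 1, be => be
  | (k+2), be =>
      -- basis = []; for i in be: sub_basis = make_stf_basis(n-1, be); basis += [i + j for j in sub_basis]
      be.foldl (fun basis i => basis ++ (stfA (k+1) be).map (fun j => i ++ j)) []

def make_stf_basis (n : Int) (basis_elements : List String) : List String :=
  stfA n.toNat basis_elements

-- ===== PORT B =====
-- result = basis_elements; for _ in range(n-1): result = [i + j for i in basis_elements for j in result]
def make_stf_basis_alt (n : Int) (basis_elements : List String) : List String :=
  (PySem.List.pyRange 0 (n - 1) 1).foldl
    (fun result _ => basis_elements.flatMap (fun i => result.map (fun j => i ++ j)))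
    basis_elements

-- ===== PRECONDITION & SPEC =====
-- A raises RecursionError for n ≤ 0 (unbounded recursion), so only n ≥ 1 is claimed.
def Pre_make_stf_basis (n : Int) (basis_elements : List String) : Prop := 1 ≤ n
instance (n : Int) (basis_elements : List String) : Decidable (Pre_make_stf_basis n basis_elements) := by unfold Pre_make_stf_basis; infer_instance
def pvWitness_make_stf_basis : Int × List String := (2, ["X", "Y", "Z"])

def Spec_make_stf_basis (n : Int) (basis_elements : List String) (out : List String) : Prop := out = make_stf_basis_alt n basis_elements
instance (n : Int) (basis_elements : List String) (out : List String) : Decidable (Spec_make_stf_basis n basis_elements out) := by unfold Spec_make_stf_basis; infer_instance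

-- ===== CLAIM (what is proved, stated in full; the proofs are below) =====
def Claim_equal_make_stf_basis : Prop := ∀ (n : Int) (basis_elements : List String), Dom_make_stf_basis n basis_elements → Pre_make_stf_basis n basis_elements → Spec_make_stf_basis n basis_elements (make_stf_basis n basis_elements)

-- ===== LEMMAS AND PROOFS =====

-- one level of A's recursion is one step of B's loop body
theorem stfA_succ_succ (k : Nat) (be : List String) :
    stfA (k+2) be = be.flatMap (fun i => (stfA (k+1) be).map (fun j => i ++ j)) := by
  conv_lhs => rw [stfA]
  rw [PySem.List.foldl_append_eq_flatMap]
  simp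

theorem stfA_eq_foldl (m : Nat) (be : List String) :
    stfA (m+1) be =
      (PySem.List.pyRange 0 (m : Int) 1).foldl
        (fun result _ => be.flatMap (fun i => result.map (fun j => i ++ j))) be := by
  induction m with
  | zero => simp [stfA]
  | succ k ih =>
      rw [stfA_succ_succ, ih]
      push_cast
      rw [PySem.List.pyRange_one_append 0 (k : Int) ((k : Int) + 1) (by positivity) (by omega)]
      have hone : PySem.List.pyRange (k : Int) ((k : Int) + 1) 1 = [(k : Int)] := by
        simp [PySem.List.pyRange_one]
      rw [hone, List.foldl_append]
      simp

-- ===== VERDICT (by name: the statement is the Claim_ definition above) =====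
theorem make_stf_basis_spec : Claim_equal_make_stf_basis := by
  intro n be _ hpre
  unfold Spec_make_stf_basis make_stf_basis make_stf_basis_alt
  obtain ⟨m, rfl⟩ : ∃ m : Nat, n = (m : Int) + 1 :=
    ⟨(n - 1).toNat, by unfold Pre_make_stf_basis at hpre; omega⟩
  have ht : ((m : Int) + 1).toNat = m + 1 := by omega
  rw [ht]
  simpa using stfA_eq_foldl m be
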